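-- pv_equiv track=rewrite | github.com/newtonsspawn/codewars_challenges | Python/4 kyu/Catching Car Mileage Numbers/isinteresting.py | is_interesting
-- ===== SOURCE A (Python) =====
-- def is_interesting(number, awesome_phrases):
--
--     def check(num):
--         if num < 100:
--             return False
--         if num in awesome_phrases:
--             return True
--         num = str(num)
--         if num[1:] == '0' * len(num[1:]):
--             return True
--         if [int(num[i + 1]) - int(num[i]) for i in range(len(num) - 1)] == [
--                 0] * (len(num) - 1):
--             return True
--         if len(num) % 2 == 0 and (
--                 num[:int(len(num) / 2)] == num[int(len(num) / 2):][::-1]):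
--             return True
--         if len(num) % 2 != 0 and (
--                 num[:int(len(num) / 2)] == num[int(len(num) / 2) + 1:][::-1]):
--             return True
--         if [int(num[i + 1]) - int(num[i]) for i in
--             range(len(num) - 1)] == [
--                 -1] * (len(num) - 1):
--             return True
--         new_num = []
--         for i in str(num):
--             if i == '0':
--                 new_num.append('10')
--             else:
--                 new_num.append(i)
--         if [int(new_num[i + 1]) - int(new_num[i]) for i in
--             range(len(new_num) - 1)] == [
--                 1] * (len(new_num) - 1):
--             return True
--
--     if check(number):
--         return 2
--     if check(number + 1) or check(number + 2):
--         return 1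
--
--     return 0
-- ===== SOURCE B (Python) =====
-- def is_interesting(number, awesome_phrases):
--
--     def check(n):
--         if n < 100:
--             return False
--         if n in awesome_phrases:
--             return True
--         s = str(n)
--         return (s in '1234567890'                 # ascending run ('0' counts as ten at the end)
--                 or s in '9876543210'              # descending run
--                 or len(set(s)) == 1               # all digits the same
--                 or s == s[0] + '0' * (len(s) - 1) # round number
--                 or s == s[::-1])                  # palindrome
--
--     if check(number):
--         return 2
--     if check(number + 1) or check(number + 2):
--         return 1
--     return 0
-- ===== Notes on version B (the rewrite author's own statement) =====
-- stated objective: simpler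
-- what changed: check(n) becomes a single boolean expression on s=str(n): ascending/descending runs detected by substring membership in '1234567890'/'9876543210' instead of building digit-difference lists, all-same via len(set(s))==1 instead of a zero-difference list, round via direct string equality, and palindrome via s==s[::-1] instead of parity-split half comparisons.
import Mathlib
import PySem

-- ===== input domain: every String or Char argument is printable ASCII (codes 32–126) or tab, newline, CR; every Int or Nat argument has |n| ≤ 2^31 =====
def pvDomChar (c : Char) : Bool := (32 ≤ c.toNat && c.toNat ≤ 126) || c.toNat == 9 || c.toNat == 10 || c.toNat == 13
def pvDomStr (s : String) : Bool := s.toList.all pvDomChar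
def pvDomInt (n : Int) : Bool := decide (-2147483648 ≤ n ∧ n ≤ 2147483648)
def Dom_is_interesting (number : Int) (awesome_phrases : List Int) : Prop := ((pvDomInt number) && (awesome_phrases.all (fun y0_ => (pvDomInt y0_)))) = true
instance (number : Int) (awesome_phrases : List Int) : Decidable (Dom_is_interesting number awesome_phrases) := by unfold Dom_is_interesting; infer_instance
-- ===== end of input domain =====

-- B rewrites check(n) as one boolean expression on the digit string (substring membership,
-- set size, string equality) instead of A's digit-difference lists and half-split palindrome test.

-- ===== PORT A =====
-- int(c) for a single digit character c (exact there; str(num) for num ≥ 100 yields only '0'-'9')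
def pvIntChar (c : Char) : Int := (c.toNat : Int) - 48
-- int(cs) for a non-empty string of digit characters (exact there; only applied to "10" and single digits)
def pvIntDigits (cs : List Char) : Int := cs.foldl (fun a c => 10 * a + pvIntChar c) 0
-- the comprehension [int(num[i+1]) - int(num[i]) for i in range(len(num) - 1)] (g = int on elements)
def pvDiffList {α : Type} (g : α → Int) (d : α) (l : List α) : List Int :=
  (PySem.List.pyRange 0 ((l.length : Int) - 1)).map
    (fun i => g (PySem.List.pyGetD l (i + 1) d) - g (PySem.List.pyGetD l i d))

-- the inner function check(num) of A; Python strings are handled on the List Char side per PySem.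
-- Indexing num[i]/num[i+1] is in range wherever evaluated, so pyGetD's default is never used;
-- int(len(num) / 2) is ported as Int floor division (exact: float division of these small ints is
-- exact and int() truncation of a nonnegative value is floor); num[::-1] is List.reverse
-- (PySem.List.slice?_none_none_neg_one); the fall-through `return None` is falsy and ported as false.
def pvCheck (awesome_phrases : List Int) (num : Int) : Bool :=
  if num < 100 then false
  else if awesome_phrases.contains num then true
  else
    let s := PySem.Int.toChars num
    if PySem.List.slice s (some 1) none ==
        List.replicate (PySem.List.slice s (some 1) none).length '0' then true
    else if pvDiffList pvIntChar ' ' s == List.replicate (s.length - 1) (0 : Int) then true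
    else if s.length % 2 == 0 &&
        (PySem.List.slice s none (some ((s.length : Int) / 2)) ==
          (PySem.List.slice s (some ((s.length : Int) / 2)) none).reverse) then true
    else if s.length % 2 != 0 &&
        (PySem.List.slice s none (some ((s.length : Int) / 2)) ==
          (PySem.List.slice s (some ((s.length : Int) / 2 + 1)) none).reverse) then true
    else if pvDiffList pvIntChar ' ' s == List.replicate (s.length - 1) (-1 : Int) then true
    else
      let new_num := s.foldl (fun acc c => acc ++ [if c == '0' then ['1', '0'] else [c]]) ([] : List (List Char))
      if pvDiffList pvIntDigits [] new_num == List.replicate (new_num.length - 1) (1 : Int) then true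
      else false

def is_interesting (number : Int) (awesome_phrases : List Int) : Int :=
  if pvCheck awesome_phrases number then 2
  else if pvCheck awesome_phrases (number + 1) || pvCheck awesome_phrases (number + 2) then 1
  else 0

-- ===== PORT B =====
def pvAscStr : List Char := ['1', '2', '3', '4', '5', '6', '7', '8', '9', '0']
def pvDescStr : List Char := ['9', '8', '7', '6', '5', '4', '3', '2', '1', '0']

-- B's check(n): one boolean expression; `sub in s` is PySem.Chars.isIn, s[0] is ported with
-- pyGetD (s = str(n) is never empty, so the default is never used), s[::-1] is List.reverse.
def pvCheckAlt (awesome_phrases : List Int) (n : Int) : Bool :=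
  if n < 100 then false
  else if awesome_phrases.contains n then true
  else
    let s := PySem.Int.toChars n
    PySem.Chars.isIn s pvAscStr || PySem.Chars.isIn s pvDescStr ||
      ((PySem.Set.ofList s).length == 1) ||
      (s == PySem.List.pyGetD s 0 ' ' :: List.replicate (s.length - 1) '0') ||
      (s == s.reverse)

def is_interesting_alt (number : Int) (awesome_phrases : List Int) : Int :=
  if pvCheckAlt awesome_phrases number then 2
  else if pvCheckAlt awesome_phrases (number + 1) || pvCheckAlt awesome_phrases (number + 2) then 1
  else 0

-- ===== PRECONDITION & SPEC =====
def Spec_is_interesting (number : Int) (awesome_phrases : List Int) (out : Int) : Prop := out = is_interesting_alt number awesome_phrases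
instance (number : Int) (awesome_phrases : List Int) (out : Int) : Decidable (Spec_is_interesting number awesome_phrases out) := by unfold Spec_is_interesting; infer_instance

-- ===== CLAIM (what is proved, stated in full; the proofs are below) =====
def Claim_equal_is_interesting : Prop := ∀ (number : Int) (awesome_phrases : List Int), Dom_is_interesting number awesome_phrases → Spec_is_interesting number awesome_phrases (is_interesting number awesome_phrases)

-- ===== LEMMAS AND PROOFS =====

theorem pv_char_toNat_inj {c d : Char} (h : c.toNat = d.toNat) : c = d := by
  rw [← Char.ofNat_toNat c, h, Char.ofNat_toNat]

theorem pv_digit_mem {c : Char} (h : c.isDigit = true) : c ∈ pvAscStr := by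
  have h0 : 48 ≤ c.toNat ∧ c.toNat ≤ 57 := by
    unfold Char.isDigit at h
    simp only [Bool.and_eq_true, decide_eq_true_eq, ge_iff_le, UInt32.le_iff_toNat_le] at h
    exact h
  have h1 : c = Char.ofNat c.toNat := (Char.ofNat_toNat c).symm
  obtain ⟨ha, hb⟩ := h0
  interval_cases hn : c.toNat <;> (rw [h1]; decide)

-- the digit string of num (num ≥ 100): nonempty, all characters digits
theorem pv_toChars_digits {num : Int} (h : 100 ≤ num) :
    PySem.Int.toChars num ≠ [] ∧ ∀ c ∈ PySem.Int.toChars num, c ∈ pvAscStr := by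
  have hneg : ¬ num < 0 := by omega
  rw [PySem.Int.toChars]
  simp only [hneg, if_false]
  refine ⟨List.ne_nil_of_length_pos Nat.length_toDigits_pos, fun c hc => ?_⟩
  exact pv_digit_mem (Nat.isDigit_of_mem_toDigits (by omega) (by omega) hc)

-- A's difference-list test is the adjacent-pair chain condition
theorem pv_diffList_eq_replicate {α : Type} (g : α → Int) (d : α) (c : Int) (l : List α) :
    (pvDiffList g d l = List.replicate (l.length - 1) c) ↔
      List.IsChain (fun a b => g b - g a = c) l := by
  rw [List.isChain_iff_getElem]
  unfold pvDiffList
  have hlen : (PySem.List.pyRange 0 ((l.length : Int) - 1)).length = l.length - 1 := by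
    rw [PySem.List.length_pyRange_one]; omega
  constructor
  · intro heq i hi
    have hi' : i < l.length - 1 := by omega
    have hi2 : i < (List.map
        (fun i => g (PySem.List.pyGetD l (i + 1) d) - g (PySem.List.pyGetD l i d))
        (PySem.List.pyRange 0 ((l.length : Int) - 1))).length := by
      rw [List.length_map, hlen]; omega
    have h1 := List.getElem_of_eq heq hi2
    simp only [List.getElem_map, List.getElem_replicate] at h1
    rw [PySem.List.getElem_pyRange_one] at h1
    have e1 : (0 : Int) + (i : Int) + 1 = ((i + 1 : Nat) : Int) := by omega
    have e2 : (0 : Int) + (i : Int) = ((i : Nat) : Int) := by omega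
    rw [e1, e2, PySem.List.pyGetD_natCast, PySem.List.pyGetD_natCast,
      List.getD_eq_getElem l d hi, List.getD_eq_getElem l d (by omega)] at h1
    exact h1
  · intro hch
    apply List.ext_getElem
    · rw [List.length_map, hlen, List.length_replicate]
    · intro i hi1 hi2
      simp only [List.length_map, List.length_replicate, hlen] at hi1 hi2
      simp only [List.getElem_map, List.getElem_replicate]
      rw [PySem.List.getElem_pyRange_one]
      have e1 : (0 : Int) + (i : Int) + 1 = ((i + 1 : Nat) : Int) := by omega
      have e2 : (0 : Int) + (i : Int) = ((i : Nat) : Int) := by omega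
      rw [e1, e2, PySem.List.pyGetD_natCast, PySem.List.pyGetD_natCast,
        List.getD_eq_getElem l d (by omega), List.getD_eq_getElem l d (by omega)]
      exact hch i (by omega)

-- zero differences ↔ len(set(s)) == 1 (for nonempty strings)
theorem pv_ofList_all_eq {h : Char} (t : List Char) (ht : ∀ y ∈ t, y = h) :
    List.foldl PySem.Set.add [h] t = [h] := by
  induction t with
  | nil => rfl
  | cons x t ih =>
    have hx : x = h := ht x (by simp)
    have hadd : PySem.Set.add [h] x = [h] := by
      subst hx; simp [PySem.Set.add, PySem.Set.contains]
    simp only [List.foldl_cons, hadd]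
    exact ih (fun y hy => ht y (by simp [hy]))

theorem pv_same_iff_set (l : List Char) (hne : l ≠ []) :
    List.IsChain (fun a b => pvIntChar b - pvIntChar a = 0) l ↔
      (PySem.Set.ofList l).length = 1 := by
  have hrel : ∀ a b : Char, (pvIntChar b - pvIntChar a = 0) ↔ a = b := by
    intro a b
    constructor
    · intro h
      have hba : b.toNat = a.toNat := by unfold pvIntChar at h; omega
      exact (pv_char_toNat_inj hba).symm
    · intro h; subst h; ring
  rcases l with _ | ⟨h, t⟩
  · simp at hne
  constructor
  · intro hch
    have hch' : List.IsChain (· = ·) (h :: t) := (List.IsChain.iff hrel).mp hch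
    have ht : t = List.replicate t.length h := List.isChain_cons_eq_iff_eq_replicate.mp hch'
    have hofl : PySem.Set.ofList (h :: t) = [h] := by
      rw [PySem.Set.ofList_eq_foldl, List.foldl_cons]
      have h0 : PySem.Set.add ([] : PySem.Set Char) h = [h] := rfl
      rw [h0, ht]
      exact pv_ofList_all_eq _ (fun y hy => List.eq_of_mem_replicate hy)
    rw [hofl]
    rfl
  · intro hlen
    obtain ⟨x, hx⟩ := List.length_eq_one_iff.mp hlen
    have hall : ∀ y ∈ h :: t, y = x := by
      intro y hy
      have hmem : y ∈ PySem.Set.ofList (h :: t) := (PySem.Set.mem_ofList _ _).mpr hy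
      rw [hx] at hmem; simpa using hmem
    have hhx : h = x := hall h (by simp)
    have hch' : List.IsChain (· = ·) (h :: t) := by
      apply List.isChain_cons_eq_iff_eq_replicate.mpr
      apply (List.eq_replicate_iff).mpr
      exact ⟨rfl, fun b hb => by rw [hall b (by simp [hb]), hhx]⟩
    exact (List.IsChain.iff hrel).mpr hch'

-- palindrome by half-split = palindrome by full reverse
theorem pv_pal_even (l : List Char) (k : Nat) (hk : l.length = 2 * k) :
    (l.take k = (l.drop k).reverse) ↔ l = l.reverse := by
  constructor
  · intro h
    calc l = l.take k ++ l.drop k := (List.take_append_drop k l).symm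
      _ = (l.drop k).reverse ++ l.drop k := by rw [h]
      _ = (l.drop k).reverse ++ (l.take k).reverse := by rw [h]; simp
      _ = (l.take k ++ l.drop k).reverse := by rw [List.reverse_append]
      _ = l.reverse := by rw [List.take_append_drop]
  · intro h
    have h1 := congrArg List.reverse (List.reverse_take (l := l) (i := k))
    simp only [List.reverse_reverse] at h1
    rw [h1, ← h]
    have hlk : l.length - k = k := by omega
    rw [hlk]

theorem pv_pal_odd (l : List Char) (k : Nat) (hk : l.length = 2 * k + 1) :
    (l.take k = (l.drop (k + 1)).reverse) ↔ l = l.reverse := by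
  have hklt : k < l.length := by omega
  have hdrop : l.drop k = l[k] :: l.drop (k + 1) := List.drop_eq_getElem_cons hklt
  constructor
  · intro h
    calc l = l.take k ++ l.drop k := (List.take_append_drop k l).symm
      _ = (l.drop (k + 1)).reverse ++ (l[k] :: l.drop (k + 1)) := by rw [h, hdrop]
      _ = ((l.drop (k + 1)).reverse ++ [l[k]]) ++ l.drop (k + 1) := by
            rw [List.append_assoc]; rfl
      _ = (l[k] :: l.drop (k + 1)).reverse ++ (l.take k).reverse := by
            rw [List.reverse_cons, h]; simp
      _ = (l.take k ++ l.drop k).reverse := by rw [hdrop, List.reverse_append]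
      _ = l.reverse := by rw [List.take_append_drop]
  · intro h
    have h1 := congrArg List.reverse (List.reverse_take (l := l) (i := k))
    simp only [List.reverse_reverse] at h1
    rw [h1, ← h]
    have hlk : l.length - k = k + 1 := by omega
    rw [hlk]

-- adjacent-step chain over a fixed alphabet = contiguous substring of the run t
theorem pv_chain_iff_infix (R : Char → Char → Prop) (g : Char → Nat) (t D : List Char)
    (htD : List.IsChain R t)
    (hpos : ∀ c ∈ D, t[g c]? = some c)
    (hstep : ∀ a ∈ D, ∀ b ∈ D, (R a b ↔ g b = g a + 1))
    (l : List Char) (hl : ∀ c ∈ l, c ∈ D) :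
    List.IsChain R l ↔ l <:+: t := by
  constructor
  · intro hch
    rcases l with _ | ⟨a, rest⟩
    · exact List.nil_infix
    · have key : ∀ (rest : List Char) (a : Char), (∀ c ∈ a :: rest, c ∈ D) →
          List.IsChain R (a :: rest) → a :: rest = (t.drop (g a)).take (rest.length + 1) := by
        intro rest
        induction rest with
        | nil =>
          intro a hmem _
          obtain ⟨hlt, hget⟩ := List.getElem?_eq_some_iff.mp (hpos a (hmem a (by simp)))
          simp [List.drop_eq_getElem_cons hlt, hget]
        | cons b rest ih =>
          intro a hmem hch
          have hR : R a b := hch.rel_head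
          have hgb : g b = g a + 1 :=
            (hstep a (hmem a (by simp)) b (hmem b (by simp))).mp hR
          have ih' := ih b (fun c hc => hmem c (List.mem_cons_of_mem a hc)) hch.tail
          obtain ⟨hlt, hget⟩ := List.getElem?_eq_some_iff.mp (hpos a (hmem a (by simp)))
          rw [List.drop_eq_getElem_cons hlt, List.length_cons, List.take_succ_cons, hget]
          congr 1
          rw [hgb] at ih'
          exact ih'
      rw [key rest a hl hch]
      exact (List.take_prefix _ _).isInfix.trans (List.drop_suffix _ _).isInfix
  · intro hinf
    obtain ⟨u, v, huv⟩ := hinf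
    have h' : List.IsChain R (u ++ l ++ v) := huv ▸ htD
    exact h'.left_of_append.right_of_append

-- the five condition bridges, stated exactly as the conditions appear in the two ports
theorem pv_round (l : List Char) (hne : l ≠ []) :
    ((PySem.List.slice l (some 1) none ==
        List.replicate (PySem.List.slice l (some 1) none).length '0') = true) ↔
      ((l == PySem.List.pyGetD l 0 ' ' :: List.replicate (l.length - 1) '0') = true) := by
  simp only [beq_iff_eq, PySem.List.slice_from_one]
  rcases l with _ | ⟨h, t⟩
  · simp at hne
  have hget : PySem.List.pyGetD (h :: t) (0 : Int) ' ' = h := by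
    rw [show (0 : Int) = ((0 : Nat) : Int) by norm_num, PySem.List.pyGetD_natCast]
    rfl
  simp only [List.tail_cons, List.length_cons, Nat.add_sub_cancel, hget]
  constructor
  · intro hr; rw [hr]; simp
  · intro hc
    exact (List.cons_eq_cons.mp hc).2

theorem pv_same (l : List Char) (hne : l ≠ []) :
    ((pvDiffList pvIntChar ' ' l == List.replicate (l.length - 1) (0 : Int)) = true) ↔
      (((PySem.Set.ofList l).length == 1) = true) := by
  simp only [beq_iff_eq]
  rw [pv_diffList_eq_replicate]
  exact pv_same_iff_set l hne

theorem pv_pal (l : List Char) :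
    (((l.length % 2 == 0 &&
        (PySem.List.slice l none (some ((l.length : Int) / 2)) ==
          (PySem.List.slice l (some ((l.length : Int) / 2)) none).reverse)) = true) ∨
     ((l.length % 2 != 0 &&
        (PySem.List.slice l none (some ((l.length : Int) / 2)) ==
          (PySem.List.slice l (some ((l.length : Int) / 2 + 1)) none).reverse)) = true)) ↔
      ((l == l.reverse) = true) := by
  have htn : ((l.length : Int) / 2).toNat = l.length / 2 := by omega
  have htn1 : ((l.length : Int) / 2 + 1).toNat = l.length / 2 + 1 := by omega
  have ht : PySem.List.slice l none (some ((l.length : Int) / 2)) = l.take (l.length / 2) := by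
    rw [PySem.List.slice_to l (by omega), htn]
  have hd : PySem.List.slice l (some ((l.length : Int) / 2)) none = l.drop (l.length / 2) := by
    rw [PySem.List.slice_from l (by omega), htn]
  have hd1 : PySem.List.slice l (some ((l.length : Int) / 2 + 1)) none = l.drop (l.length / 2 + 1) := by
    rw [PySem.List.slice_from l (by omega), htn1]
  rw [ht, hd, hd1]
  simp only [Bool.and_eq_true, beq_iff_eq, bne_iff_ne, ne_eq]
  by_cases hpar : l.length % 2 = 0
  · have hk : l.length = 2 * (l.length / 2) := by omega
    constructor
    · rintro (⟨_, h⟩ | ⟨hne2, _⟩)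
      · exact (pv_pal_even l _ hk).mp h
      · exact absurd hpar hne2
    · intro h
      exact Or.inl ⟨hpar, (pv_pal_even l _ hk).mpr h⟩
  · have hk : l.length = 2 * (l.length / 2) + 1 := by omega
    constructor
    · rintro (⟨h0, _⟩ | ⟨_, h⟩)
      · exact absurd h0 hpar
      · exact (pv_pal_odd l _ hk).mp h
    · intro h
      exact Or.inr ⟨hpar, (pv_pal_odd l _ hk).mpr h⟩

theorem pv_desc (l : List Char) (hdig : ∀ c ∈ l, c ∈ pvAscStr) :
    ((pvDiffList pvIntChar ' ' l == List.replicate (l.length - 1) (-1 : Int)) = true) ↔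
      (PySem.Chars.isIn l pvDescStr = true) := by
  simp only [beq_iff_eq]
  rw [pv_diffList_eq_replicate, PySem.Chars.isIn_iff_infix]
  refine pv_chain_iff_infix _ (fun c => 57 - c.toNat) pvDescStr pvAscStr ?_
    (by intro c hc; fin_cases hc <;> decide)
    (by intro a ha b hb; fin_cases ha <;> fin_cases hb <;> decide) l hdig
  simp only [pvDescStr, List.isChain_cons_cons, List.IsChain.singleton, and_true]
  decide

theorem pv_asc (l : List Char) (hdig : ∀ c ∈ l, c ∈ pvAscStr) :
    ((pvDiffList pvIntDigits []
        (l.foldl (fun acc c => acc ++ [if c == '0' then ['1', '0'] else [c]]) ([] : List (List Char))) ==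
      List.replicate
        ((l.foldl (fun acc c => acc ++ [if c == '0' then ['1', '0'] else [c]]) ([] : List (List Char))).length - 1)
        (1 : Int)) = true) ↔
      (PySem.Chars.isIn l pvAscStr = true) := by
  have hmapfold : l.foldl (fun acc c => acc ++ [if c == '0' then ['1', '0'] else [c]]) ([] : List (List Char)) =
      l.map (fun c => if c == '0' then ['1', '0'] else [c]) := by
    simpa using PySem.List.foldl_append_singleton_eq_map (fun c : Char => if c == '0' then ['1', '0'] else [c]) l []
  rw [hmapfold]
  simp only [beq_iff_eq]
  rw [pv_diffList_eq_replicate, List.isChain_map, PySem.Chars.isIn_iff_infix]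
  refine pv_chain_iff_infix _
    (fun c => (pvIntDigits (if c == '0' then ['1', '0'] else [c])).toNat - 1) pvAscStr pvAscStr
    ?_
    (by intro c hc; fin_cases hc <;> decide)
    (by intro a ha b hb; fin_cases ha <;> fin_cases hb <;> decide) l hdig
  simp only [pvAscStr, List.isChain_cons_cons, List.IsChain.singleton, and_true]
  decide

theorem pv_chain_eq_bool (a b c d e f : Bool) :
    (if a then true else if b then true else if c then true
      else if d then true else if e then true else if f then true else false) =
    (a || b || c || d || e || f) := by
  cases a <;> cases b <;> cases c <;> cases d <;> cases e <;> cases f <;> rfl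

set_option maxHeartbeats 1000000 in
theorem pv_check_eq (ph : List Int) (num : Int) : pvCheck ph num = pvCheckAlt ph num := by
  simp only [pvCheck, pvCheckAlt]
  by_cases h1 : num < 100
  · simp [h1]
  simp only [if_neg h1]
  cases hc : ph.contains num
  · simp only [Bool.false_eq_true, if_false]
    have hnum : 100 ≤ num := by omega
    obtain ⟨hne, hdig⟩ := pv_toChars_digits hnum
    rw [pv_chain_eq_bool, Bool.eq_iff_iff]
    simp only [Bool.or_eq_true, or_assoc]
    have h4 := pv_round _ hne
    have h3 := pv_same _ hne
    have h5 := pv_pal (PySem.Int.toChars num)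
    have h2 := pv_desc _ hdig
    have hB1 := pv_asc _ hdig
    constructor
    · rintro (h | h | h | h | h | h)
      · exact Or.inr (Or.inr (Or.inr (Or.inl (h4.mp h))))
      · exact Or.inr (Or.inr (Or.inl (h3.mp h)))
      · exact Or.inr (Or.inr (Or.inr (Or.inr (h5.mp (Or.inl h)))))
      · exact Or.inr (Or.inr (Or.inr (Or.inr (h5.mp (Or.inr h)))))
      · exact Or.inr (Or.inl (h2.mp h))
      · exact Or.inl (hB1.mp h)
    · rintro (h | h | h | h | h)
      · exact Or.inr (Or.inr (Or.inr (Or.inr (Or.inr (hB1.mpr h)))))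
      · exact Or.inr (Or.inr (Or.inr (Or.inr (Or.inl (h2.mpr h)))))
      · exact Or.inr (Or.inl (h3.mpr h))
      · exact Or.inl (h4.mpr h)
      · rcases h5.mpr h with h' | h'
        · exact Or.inr (Or.inr (Or.inl h'))
        · exact Or.inr (Or.inr (Or.inr (Or.inl h')))
  · simp

-- ===== VERDICT (by name: the statement is the Claim_ definition above) =====
theorem is_interesting_spec : Claim_equal_is_interesting := by
  unfold Claim_equal_is_interesting
  intro number ph _
  unfold Spec_is_interesting is_interesting is_interesting_alt
  rw [pv_check_eq, pv_check_eq, pv_check_eq]
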